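-- pv_equiv track=rewrite | github.com/LucasDM1/python-lists-loops-programming-exercises | exercises/16-Techno_beat/app.py | lyrics_generator
-- ===== SOURCE A (Python) =====
-- def lyrics_generator(arr):
--     aux=[]
--     counter=1
--     str1=""
--     for i in range(0, len(arr)):
--         if arr[i] == 1:
--             if counter==3:
--                 aux.append("Drop the base !!!Break the base!!! " )
--                 counter=0
--             else:
--                 aux.append("Drop the base ")
--                 counter+=1
--         else:
--             aux.append("Boom ")
--     return str1.join(aux)
-- ===== SOURCE B (Python) =====
-- def lyrics_generator(arr):
--     # prefix one-counts in one pass, then a shape-mapping comprehension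
--     cum = []
--     c = 0
--     for x in arr:
--         if x == 1:
--             c += 1
--         cum.append(c)
--     return ''.join(
--         ("Drop the base !!!Break the base!!! " if k % 4 == 3 else "Drop the base ")
--         if x == 1 else "Boom "
--         for x, k in zip(arr, cum)
--     )
-- ===== Notes on version B (the rewrite author's own statement) =====
-- stated objective: alternative
-- what changed: Replaces the in-loop resetting counter with a precomputed prefix table of cumulative one-counts plus a separate mapping pass keyed on count % 4 == 3.
import Mathlib
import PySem

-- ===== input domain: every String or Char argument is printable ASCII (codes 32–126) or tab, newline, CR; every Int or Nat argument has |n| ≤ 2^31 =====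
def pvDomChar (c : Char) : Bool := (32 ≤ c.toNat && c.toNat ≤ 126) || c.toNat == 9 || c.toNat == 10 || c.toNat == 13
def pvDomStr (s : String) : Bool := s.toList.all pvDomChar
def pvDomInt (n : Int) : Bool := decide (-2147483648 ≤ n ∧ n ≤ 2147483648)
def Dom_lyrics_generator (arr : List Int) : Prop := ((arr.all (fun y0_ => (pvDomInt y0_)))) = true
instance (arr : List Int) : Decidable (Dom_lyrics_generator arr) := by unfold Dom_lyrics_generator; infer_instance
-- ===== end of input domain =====

-- B replaces A's in-loop resetting counter by a precomputed prefix table of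
-- cumulative one-counts plus a separate mapping pass (same O(n) cost; objective: alternative).

-- ===== PORT A =====
-- A's loop over the array elements carrying the resetting counter, collecting `aux`
def lyricsLoopA : List Int → Int → List String
  | [], _ => []
  | x :: xs, counter =>
      if x == 1 then
        if counter == 3 then
          "Drop the base !!!Break the base!!! " :: lyricsLoopA xs 0
        else
          "Drop the base " :: lyricsLoopA xs (counter + 1)
      else
        "Boom " :: lyricsLoopA xs counter

def lyrics_generator (arr : List Int) : String :=
  String.join (lyricsLoopA arr 1)

-- ===== PORT B =====
-- first pass of Source B: cumulative one-count at each position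
def cumOnes : List Int → Int → List Int
  | [], _ => []
  | x :: xs, c =>
      let c' := if x == 1 then c + 1 else c
      c' :: cumOnes xs c'

-- second pass of Source B: the mapping over zip(arr, cum), joined
def lyrics_generator_alt (arr : List Int) : String :=
  String.join ((arr.zip (cumOnes arr 0)).map (fun p =>
    if p.1 == 1 then
      (if PySem.Int.mod p.2 4 == 3 then "Drop the base !!!Break the base!!! " else "Drop the base ")
    else "Boom "))

-- ===== PRECONDITION & SPEC =====
def Spec_lyrics_generator (arr : List Int) (out : String) : Prop := out = lyrics_generator_alt arr
instance (arr : List Int) (out : String) : Decidable (Spec_lyrics_generator arr out) := by unfold Spec_lyrics_generator; infer_instance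

-- ===== CLAIM (what is proved, stated in full; the proofs are below) =====
def Claim_equal_lyrics_generator : Prop := ∀ (arr : List Int), Dom_lyrics_generator arr → Spec_lyrics_generator arr (lyrics_generator arr)

-- ===== LEMMAS AND PROOFS =====

-- Invariant linking A's counter to the prefix one-count c: counter = (c+1) % 4 (with 0 ≤ c).
theorem lyricsLoopA_eq_map (arr : List Int) : ∀ (c : Int), 0 ≤ c →
    lyricsLoopA arr ((c + 1) % 4) =
      (arr.zip (cumOnes arr c)).map (fun p =>
        if p.1 == 1 then
          (if PySem.Int.mod p.2 4 == 3 then "Drop the base !!!Break the base!!! " else "Drop the base ")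
        else "Boom ") := by
  induction arr with
  | nil => intro c _; rfl
  | cons x xs ih =>
    intro c hc
    by_cases hx : x = 1
    · simp only [lyricsLoopA, cumOnes, hx, List.zip_cons_cons, List.map_cons,
        beq_self_eq_true, if_true]
      rw [PySem.Int.mod_eq_emod_of_pos (by omega)]
      by_cases h3 : (c + 1) % 4 = 3
      · have h0 : (0 : Int) = ((c + 1) + 1) % 4 := by omega
        rw [if_pos (by exact beq_iff_eq.mpr h3), if_pos (by exact beq_iff_eq.mpr h3)]
        rw [h0, ih (c + 1) (by omega)]
      · have hne : ((c + 1) % 4 == 3) = false := by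
          exact beq_eq_false_iff_ne.mpr h3
        rw [hne]
        simp only [Bool.false_eq_true, if_false]
        have h1 : (c + 1) % 4 + 1 = ((c + 1) + 1) % 4 := by omega
        rw [h1, ih (c + 1) (by omega)]
    · have hnx : (x == 1) = false := beq_eq_false_iff_ne.mpr hx
      simp only [lyricsLoopA, cumOnes, hnx, List.zip_cons_cons, List.map_cons,
        Bool.false_eq_true, if_false]
      rw [ih c hc]

-- ===== VERDICT (by name: the statement is the Claim_ definition above) =====
theorem lyrics_generator_spec : Claim_equal_lyrics_generator := by
  intro arr _
  unfold Spec_lyrics_generator lyrics_generator lyrics_generator_alt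
  have h := lyricsLoopA_eq_map arr 0 (by omega)
  rw [show ((0 : Int) + 1) % 4 = 1 by decide] at h
  rw [h]
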